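-- pv_equiv track=rewrite | github.com/matthewapeters/agentix | src/agentix/tools/describe_tools.py | _docstring_summary
-- ===== SOURCE A (Python) =====
-- from typing import Dict, List, Optional
--
-- def _docstring_summary(doc: Optional[str]) -> Optional[str]:
--     if not doc:
--         return None
--     # summary = first non-empty line
--     for line in doc.strip().splitlines():
--         s = line.strip()
--         if s:
--             return s
--     return None
-- ===== SOURCE B (Python) =====
-- from typing import Optional
--
-- def _docstring_summary(doc: Optional[str]) -> Optional[str]:
--     if not doc:
--         return None
--     stripped = doc.strip()
--     if not stripped:
--         return None
--     # after strip(), the first splitlines() element is the first non-empty line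
--     return stripped.splitlines()[0].strip()
-- ===== Notes on version B (the rewrite author's own statement) =====
-- stated objective: simpler
-- what changed: B eliminates A's scan over all lines: after doc.strip() the first splitlines() element is provably the first non-empty line, so B guards against the all-whitespace case and indexes splitlines()[0] directly instead of looping with an emptiness test.
import Mathlib
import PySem

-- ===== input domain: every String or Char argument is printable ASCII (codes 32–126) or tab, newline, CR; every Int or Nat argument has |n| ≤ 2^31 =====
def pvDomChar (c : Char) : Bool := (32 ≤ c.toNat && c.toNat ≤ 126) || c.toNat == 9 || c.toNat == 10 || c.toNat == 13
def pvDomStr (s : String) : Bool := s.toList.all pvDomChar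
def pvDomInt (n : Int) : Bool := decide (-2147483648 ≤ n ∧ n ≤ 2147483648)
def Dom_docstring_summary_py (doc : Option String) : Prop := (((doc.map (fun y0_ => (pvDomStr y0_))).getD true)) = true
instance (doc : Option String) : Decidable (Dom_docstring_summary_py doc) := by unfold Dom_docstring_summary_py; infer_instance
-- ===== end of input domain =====

-- B replaces A's scan over all lines by a direct access to the first splitlines element
-- (which after doc.strip() is always the first non-empty line), guarded by a strippedness test.

-- ===== PORT A =====
-- the for-loop over doc.strip().splitlines(): first line whose strip is non-empty
def pvAFirst : List (List Char) → Option String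
  | [] => none
  | line :: rest =>
    let s := PySem.Chars.strip line
    if s.isEmpty then pvAFirst rest else some (String.ofList s)

def docstring_summary_py (doc : Option String) : Option String :=
  match doc with
  | none => none
  | some d =>
    if d.toList.isEmpty then none       -- `if not doc` (None handled above, "" falsy here)
    else pvAFirst (PySem.Chars.splitlines (PySem.Chars.strip d.toList))

-- ===== PORT B =====
def docstring_summary_py_alt (doc : Option String) : Option String :=
  match doc with
  | none => none
  | some d =>
    if d.toList.isEmpty then none       -- `if not doc`
    else
      let stripped := PySem.Chars.strip d.toList
      if stripped.isEmpty then none     -- `if not stripped`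
      else
        match PySem.List.pyGet? (PySem.Chars.splitlines stripped) 0 with
        | some line => some (String.ofList (PySem.Chars.strip line))
        | none => none                  -- unreachable: splitlines of a non-empty string is non-empty

-- ===== PRECONDITION & SPEC =====
def Spec_docstring_summary_py (doc : Option String) (out : Option String) : Prop := out = docstring_summary_py_alt doc
instance (doc : Option String) (out : Option String) : Decidable (Spec_docstring_summary_py doc out) := by unfold Spec_docstring_summary_py; infer_instance

-- ===== CLAIM (what is proved, stated in full; the proofs are below) =====
def Claim_equal_docstring_summary_py : Prop := ∀ (doc : Option String), Dom_docstring_summary_py doc → Spec_docstring_summary_py doc (docstring_summary_py doc)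

-- ===== LEMMAS AND PROOFS =====

-- the concrete line-break predicate inside PySem.Chars.splitlines
def pvIsB : Char → Bool := fun c =>
  have n := c.toNat;
  decide (n = 10) || decide (n = 13) || decide (n = 11) || decide (n = 12) || decide (n = 28) || decide (n = 29) ||
          decide (n = 30) ||
        decide (n = 133) ||
      decide (n = 8232) ||
    decide (n = 8233)

theorem splitlines_eq_go (s : List Char) :
    PySem.Chars.splitlines s = PySem.Chars.splitlines.go pvIsB s [] [] := rfl

theorem pvIsB_false_of_not_space (c : Char) (h : PySem.Chars.isspace c = false) : pvIsB c = false := by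
  unfold PySem.Chars.isspace at h
  unfold pvIsB
  simp only [Bool.or_eq_false_iff, decide_eq_false_iff_not, Bool.and_eq_false_iff] at h ⊢
  omega

theorem go_nil (isB : Char → Bool) (cur : List Char) (acc : List (List Char)) :
    PySem.Chars.splitlines.go isB [] cur acc =
      if cur.isEmpty then acc.reverse else (cur.reverse :: acc).reverse := by
  rw [PySem.Chars.splitlines.go.eq_def]

theorem go_acc (isB : Char → Bool) : ∀ (n : Nat) (l cur : List Char) (acc : List (List Char)),
    l.length ≤ n →
    PySem.Chars.splitlines.go isB l cur acc = acc.reverse ++ PySem.Chars.splitlines.go isB l cur [] := by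
  intro n
  induction n with
  | zero =>
    intro l cur acc hl
    have : l = [] := List.eq_nil_of_length_eq_zero (Nat.le_zero.mp hl)
    subst this
    rw [go_nil, go_nil]
    split <;> simp
  | succ n ih =>
    intro l cur acc hl
    rw [PySem.Chars.splitlines.go.eq_def]
    conv_rhs => rw [PySem.Chars.splitlines.go.eq_def]
    split
    · split <;> simp
    · rename_i rest
      rw [ih rest [] _ (by simpa using Nat.le_of_succ_le_succ (le_trans (by simp) hl)),
          ih rest [] [cur.reverse] (by simpa using Nat.le_of_succ_le_succ (le_trans (by simp) hl))]
      simp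
    · rename_i c rest _
      by_cases hb : isB c = true
      · simp only [hb, if_true]
        rw [ih rest [] _ (by simpa using Nat.le_of_succ_le_succ hl),
            ih rest [] [cur.reverse] (by simpa using Nat.le_of_succ_le_succ hl)]
        simp
      · simp only [hb, Bool.false_eq_true, if_false]
        exact ih rest (c::cur) acc (by simpa using Nat.le_of_succ_le_succ hl)

-- starting from a non-empty accumulator, the first emitted line extends cur.reverse
theorem go_head (isB : Char → Bool) : ∀ (n : Nat) (l cur : List Char),
    l.length ≤ n → cur ≠ [] →
    ∃ u tl, PySem.Chars.splitlines.go isB l cur [] = (cur.reverse ++ u) :: tl := by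
  intro n
  induction n with
  | zero =>
    intro l cur hl hcur
    have : l = [] := List.eq_nil_of_length_eq_zero (Nat.le_zero.mp hl)
    subst this
    refine ⟨[], [], ?_⟩
    rw [go_nil]
    simp [hcur]
  | succ n ih =>
    intro l cur hl hcur
    rw [PySem.Chars.splitlines.go.eq_def]
    split
    · rename_i cur2 y1 y2 y3
      exact ⟨[], [], by simp [hcur]⟩
    · rename_i cur2 y1 y2 y3 rest
      refine ⟨[], PySem.Chars.splitlines.go isB rest [] [], ?_⟩
      rw [go_acc isB rest.length rest [] [cur2.reverse] le_rfl]
      simp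
    · rename_i cur2 y1 y2 y3 c rest hno
      by_cases hb : isB c = true
      · refine ⟨[], PySem.Chars.splitlines.go isB rest [] [], ?_⟩
        simp only [hb, if_true]
        rw [go_acc isB rest.length rest [] [cur2.reverse] le_rfl]
        simp
      · simp only [hb, Bool.false_eq_true, if_false]
        obtain ⟨u, tl, hu⟩ := ih rest (c :: cur2) (by simpa using Nat.le_of_succ_le_succ hl) (by simp)
        exact ⟨c :: u, tl, by simpa using hu⟩

-- if dropWhile returns c :: t then p c = false
theorem dropWhile_head_false {α : Type} (p : α → Bool) :
    ∀ (l : List α) {c : α} {t : List α}, l.dropWhile p = c :: t → p c = false := by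
  intro l
  induction l with
  | nil => intro c t h; simp at h
  | cons a l ih =>
    intro c t h
    rw [List.dropWhile_cons] at h
    by_cases ha : p a = true
    · rw [if_pos ha] at h; exact ih h
    · rw [if_neg ha] at h
      cases h
      exact Bool.eq_false_iff.mpr ha

-- the head of a non-empty strip result is not whitespace
theorem strip_head_not_space (s : List Char) {c : Char} {t : List Char}
    (h : PySem.Chars.strip s = c :: t) : PySem.Chars.isspace c = false := by
  have hpre : PySem.Chars.strip s <+: PySem.Chars.lstrip s := by
    unfold PySem.Chars.strip PySem.Chars.rstrip
    have := (List.dropWhile_suffix (l := (PySem.Chars.lstrip s).reverse) PySem.Chars.isspace).reverse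
    simpa using this
  rw [h] at hpre
  obtain ⟨r, hr⟩ := hpre
  have : List.dropWhile PySem.Chars.isspace s = c :: (t ++ r) := by
    unfold PySem.Chars.lstrip at hr
    simpa using hr.symm
  exact dropWhile_head_false PySem.Chars.isspace s this

-- strip of a list headed by a non-space char is non-empty
theorem strip_cons_ne_nil (c : Char) (u : List Char) (hc : PySem.Chars.isspace c = false) :
    PySem.Chars.strip (c :: u) ≠ [] := by
  unfold PySem.Chars.strip PySem.Chars.lstrip PySem.Chars.rstrip
  rw [List.dropWhile_cons, if_neg (by simp [hc])]
  intro hnil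
  have := List.reverse_eq_nil_iff.mp hnil
  rw [List.dropWhile_eq_nil_iff] at this
  have hcmem : c ∈ (c :: u).reverse := by simp
  have := this c hcmem
  simp [hc] at this

theorem splitlines_empty : PySem.Chars.splitlines ([] : List Char) = [] := rfl

-- ===== VERDICT (by name: the statement is the Claim_ definition above) =====
theorem docstring_summary_py_spec : Claim_equal_docstring_summary_py := by
  intro doc _
  unfold Spec_docstring_summary_py
  match doc with
  | none => rfl
  | some d =>
    unfold docstring_summary_py docstring_summary_py_alt
    by_cases hd : d.toList.isEmpty
    · simp [hd]
    · simp only [hd, Bool.false_eq_true, if_false]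
      by_cases hs : (PySem.Chars.strip d.toList).isEmpty
      · have : PySem.Chars.strip d.toList = [] := by simpa using hs
        rw [this]
        simp [splitlines_empty, pvAFirst]
      · have hne : PySem.Chars.strip d.toList ≠ [] := by simpa using hs
        obtain ⟨c, t, hct⟩ := List.exists_cons_of_ne_nil hne
        have hsp : PySem.Chars.isspace c = false := strip_head_not_space d.toList hct
        have hb : pvIsB c = false := pvIsB_false_of_not_space c hsp
        have hcr : c ≠ '\x0d' := by
          intro h; subst h; simp [pvIsB] at hb
        -- first step of go on c :: t : third match branch
        have hstep : PySem.Chars.splitlines.go pvIsB (c :: t) [] [] =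
            PySem.Chars.splitlines.go pvIsB t [c] [] := by
          rw [PySem.Chars.splitlines.go.eq_def]
          split
          all_goals rename_i ys
          all_goals try (rename_i rest; injection ys with h1 h2)
          · simp at ys
          · exact absurd h1 hcr
          · rename_i hno; subst h1; subst h2; simp [hb]
        obtain ⟨u, tl, hu⟩ := go_head pvIsB t.length t [c] le_rfl (by simp)
        have hsplit : PySem.Chars.splitlines (PySem.Chars.strip d.toList) = (c :: u) :: tl := by
          rw [hct, splitlines_eq_go, hstep, hu]; simp
        have hstrip_ne : PySem.Chars.strip (c :: u) ≠ [] := strip_cons_ne_nil c u hsp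
        rw [hsplit]
        simp only [pvAFirst, PySem.List.pyGet?]
        simp [hstrip_ne, hne, PySem.List.pyIdx?]
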